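-- pv_equiv track=rewrite | github.com/shayanhalder/Tetris | matching_mechanics.py | _check_diagonal_matches
-- ===== SOURCE A (Python) =====
-- EMPTY = 0
--
-- def _check_diagonal_matches(matrix: list[list[str]]) -> list[tuple]:
--     """ Given a 2D list, a list of tuple coordinates are returned,
--         with the tuple coordinates representing diagonal matches. """
--
--     match_indices = []
--     for i in range(len(matrix) - 1, -1, -1):
--         for j in range(len(matrix[i])):
--             right_diagonal_matches = _scan_diagonal_direction(matrix, i, j, 'right')
--             for diagonal_match in right_diagonal_matches:
--                 if diagonal_match not in match_indices:
--                     match_indices.append(diagonal_match)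
--
--             left_diagonal_matches = _scan_diagonal_direction(matrix, i, j, 'left')
--             for diagonal_match in left_diagonal_matches:
--                 if diagonal_match not in match_indices:
--                     match_indices.append(diagonal_match)
--
--     return match_indices
--
-- def _scan_diagonal_direction(matrix: list[list[str]], current_row_index: int, current_column_index: int, direction: str):
--     """ Given either a 'right' or 'left' direction, the function will scan for diagonal
--         matches only in that direction (up, right, up, etc...) or (up, left, up, etc...)"""
--
--     match_indices = []
--     vertical_index_counter = current_row_index
--     horizontal_index_counter = current_column_index
--     horizontal_index_delta = 1 if direction == "right" else (-1 if direction == "left" else None)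
--     current_jewel = matrix[current_row_index][current_column_index]
--     counter = 0 # to determine how long the match is
--     while True:
--         if vertical_index_counter < 0 \
--             or horizontal_index_counter > len(matrix[current_row_index]) - 1 \
--             or horizontal_index_counter < 0: # handle out of bounds indices
--                 break
--         if matrix[vertical_index_counter][horizontal_index_counter] != current_jewel \
--             or matrix[vertical_index_counter][horizontal_index_counter] == EMPTY: # match streak broken
--             break
--
--         counter += 1
--         vertical_index_counter += -1
--         horizontal_index_counter += horizontal_index_delta
--     if counter >= 3:
--         for delta in range(counter):
--             new_point = (current_row_index - delta, current_column_index + (delta * horizontal_index_delta))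
--             match_indices.append(new_point)
--
--     return match_indices
-- ===== SOURCE B (Python) =====
-- # B: O(R*C) re-implementation — run lengths of up-right/up-left diagonals via DP over
-- # rows (instead of re-scanning the diagonal from every cell), dedup via auxiliary set.
-- def _check_diagonal_matches(matrix: list[list[str]]) -> list[tuple]:
--     cols = len(matrix[0]) if matrix else 0
--     right, left = [], []          # run-length tables, built row by row
--     prev_row = pr = pl = None
--     for row in matrix:
--         if prev_row is None:
--             cr = [1] * cols
--             cl = [1] * cols
--         else:
--             cr = [pr[j + 1] + 1 if j + 1 < cols and row[j] == prev_row[j + 1] else 1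
--                   for j in range(cols)]
--             cl = [pl[j - 1] + 1 if j - 1 >= 0 and row[j] == prev_row[j - 1] else 1
--                   for j in range(cols)]
--         right.append(cr)
--         left.append(cl)
--         prev_row, pr, pl = row, cr, cl
--     result = []
--     seen = set()
--     for i in range(len(matrix) - 1, -1, -1):
--         for j in range(cols):
--             if right[i][j] >= 3:
--                 for delta in range(right[i][j]):
--                     p = (i - delta, j + delta)
--                     if p not in seen:
--                         seen.add(p)
--                         result.append(p)
--             if left[i][j] >= 3:
--                 for delta in range(left[i][j]):
--                     p = (i - delta, j - delta)
--                     if p not in seen: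
--                         seen.add(p)
--                         result.append(p)
--     return result
-- ===== Notes on version B (the rewrite author's own statement) =====
-- stated objective: faster
-- what changed: Replaces A's per-cell diagonal re-scan (a while-loop walked up the diagonal from every cell) by dynamic programming that computes all diagonal run lengths in one pass over the rows, and replaces the O(n) 'not in result' membership test by an auxiliary set, keeping the exact emission/insertion order.
-- outside the precondition, e.g. on _check_diagonal_matches([['a', 'b'], ['c']]): A returns [], B raises IndexError
import Mathlib
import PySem

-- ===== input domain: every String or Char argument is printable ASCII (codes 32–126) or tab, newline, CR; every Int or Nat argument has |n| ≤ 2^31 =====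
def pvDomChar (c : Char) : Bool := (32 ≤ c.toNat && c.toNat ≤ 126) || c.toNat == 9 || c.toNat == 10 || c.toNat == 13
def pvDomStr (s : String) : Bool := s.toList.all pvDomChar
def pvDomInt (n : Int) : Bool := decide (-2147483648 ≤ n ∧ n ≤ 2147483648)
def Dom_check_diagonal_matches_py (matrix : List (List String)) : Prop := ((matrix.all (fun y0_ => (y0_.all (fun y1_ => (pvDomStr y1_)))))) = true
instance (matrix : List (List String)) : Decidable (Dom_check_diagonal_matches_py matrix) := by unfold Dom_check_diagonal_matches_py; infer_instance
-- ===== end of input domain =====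

-- B replaces A's per-cell diagonal re-scan by run-length DP over rows and the list-membership
-- dedup by an auxiliary set (objective: faster).
-- Return-value equivalence only; neither program mutates its argument.

-- ===== PORT A =====

-- matrix[v][h]; A only evaluates it after its own bounds checks, so the defaults are never used on Pre_
def pvCell (matrix : List (List String)) (v h : Int) : String :=
  (matrix.getD v.toNat []).getD h.toNat ""

-- the while-loop of _scan_diagonal_direction; returns the final `counter`.
-- (`matrix[v][h] == EMPTY` compares a str with the int 0, hence is always False in Python; ported as `∨ False`.)
def pvScanLen (matrix : List (List String)) (bound : Int) (jewel : String) (d : Int)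
    (v h counter : Int) : Int :=
  if _hv : v < 0 ∨ h > bound - 1 ∨ h < 0 then counter
  else if pvCell matrix v h ≠ jewel ∨ False then counter
  else pvScanLen matrix bound jewel d (v - 1) (h + d) (counter + 1)
termination_by (v + 1).toNat
decreasing_by simp at _hv; omega

def pvScanDiagonalDirection (matrix : List (List String)) (i j : Int) (direction : String) :
    List (Int × Int) :=
  let d : Int := if direction = "right" then 1 else -1
  let jewel := pvCell matrix i j
  let counter := pvScanLen matrix ((matrix.getD i.toNat []).length : Int) jewel d i j 0
  if counter ≥ 3 then
    (List.range counter.toNat).map (fun (δ : Nat) => (i - (δ : Int), j + (δ : Int) * d))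
  else []

def check_diagonal_matches_py (matrix : List (List String)) : List (Int × Int) :=
  (PySem.List.pyRange ((matrix.length : Int) - 1) (-1) (-1)).foldl (fun acc i =>
    (PySem.List.pyRange 0 ((matrix.getD i.toNat []).length : Int) 1).foldl (fun acc j =>
      let acc1 := (pvScanDiagonalDirection matrix i j "right").foldl
        (fun a p => if p ∈ a then a else a ++ [p]) acc
      (pvScanDiagonalDirection matrix i j "left").foldl
        (fun a p => if p ∈ a then a else a ++ [p]) acc1) acc) []

-- ===== PORT B =====

-- one DP row for the up-right direction: cr[j] = pr[j+1]+1 if the diagonal continues, else 1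
def pvRowR (row prevRow : List String) (pr : List Int) (cols : Nat) : List Int :=
  (List.range cols).map (fun j =>
    if j + 1 < cols ∧ row.getD j "" = prevRow.getD (j + 1) "" then pr.getD (j + 1) 0 + 1 else 1)

-- one DP row for the up-left direction
def pvRowL (row prevRow : List String) (pl : List Int) (cols : Nat) : List Int :=
  (List.range cols).map (fun j =>
    if 1 ≤ j ∧ row.getD j "" = prevRow.getD (j - 1) "" then pl.getD (j - 1) 0 + 1 else 1)

-- the first for-loop of B: builds both run-length tables row by row, carrying (prev_row, pr, pl)
def pvBuild (cols : Nat) :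
    Option (List String × List Int × List Int) → List (List String) →
    List (List Int) × List (List Int)
  | _, [] => ([], [])
  | none, row :: rest =>
      let cr := List.replicate cols 1
      let cl := List.replicate cols 1
      let t := pvBuild cols (some (row, cr, cl)) rest
      (cr :: t.1, cl :: t.2)
  | some (prevRow, pr, pl), row :: rest =>
      let cr := pvRowR row prevRow pr cols
      let cl := pvRowL row prevRow pl cols
      let t := pvBuild cols (some (row, cr, cl)) rest
      (cr :: t.1, cl :: t.2)

-- `for delta in range(r): p = (i-delta, j+delta); if p not in seen: seen.add(p); result.append(p)`
def pvEmitR (i j : Int) (r : Int) (sr : PySem.Set (Int × Int) × List (Int × Int)) :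
    PySem.Set (Int × Int) × List (Int × Int) :=
  (List.range r.toNat).foldl (fun sr (δ : Nat) =>
    let p : Int × Int := (i - (δ : Int), j + (δ : Int))
    if p ∈ sr.1 then sr else (PySem.Set.add sr.1 p, sr.2 ++ [p])) sr

-- the same with p = (i-delta, j-delta)
def pvEmitL (i j : Int) (l : Int) (sr : PySem.Set (Int × Int) × List (Int × Int)) :
    PySem.Set (Int × Int) × List (Int × Int) :=
  (List.range l.toNat).foldl (fun sr (δ : Nat) =>
    let p : Int × Int := (i - (δ : Int), j - (δ : Int))
    if p ∈ sr.1 then sr else (PySem.Set.add sr.1 p, sr.2 ++ [p])) sr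

def check_diagonal_matches_py_alt (matrix : List (List String)) : List (Int × Int) :=
  let cols := (matrix.headD []).length
  let t := pvBuild cols none matrix
  ((PySem.List.pyRange ((matrix.length : Int) - 1) (-1) (-1)).foldl (fun sr i =>
    (PySem.List.pyRange 0 (cols : Int) 1).foldl (fun sr j =>
      let r := (t.1.getD i.toNat []).getD j.toNat 0
      let sr1 := if r ≥ 3 then pvEmitR i j r sr else sr
      let l := (t.2.getD i.toNat []).getD j.toNat 0
      if l ≥ 3 then pvEmitL i j l sr1 else sr1) sr) (PySem.Set.empty, ([] : List (Int × Int)))).2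

-- ===== PRECONDITION & SPEC =====
-- Pre_ restricts to rectangular matrices: on ragged ones A's bounds check uses the starting
-- row's length for every row it visits, so A raises IndexError on most of them, and B's
-- row-0-width DP raises on others.
def Pre_check_diagonal_matches_py (matrix : List (List String)) : Prop :=
  ∀ row ∈ matrix, row.length = (matrix.headD []).length
-- (on a ragged matrix A's scans `_scan_diagonal_direction(matrix, i, j, "right")` and
-- `_scan_diagonal_direction(matrix, i, j, "left")` bound the column by the starting row's
-- length while indexing the rows above, so they raise IndexError when a visited row is shorter)

instance (matrix : List (List String)) : Decidable (Pre_check_diagonal_matches_py matrix) := by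
  unfold Pre_check_diagonal_matches_py; infer_instance

def pvWitness_check_diagonal_matches_py : List (List String) :=
  [["a", "b", "a", "a"], ["a", "a", "b", "a"], ["a", "a", "a", "b"], ["b", "a", "a", "a"]]

def Spec_check_diagonal_matches_py (matrix : List (List String)) (out : List (Int × Int)) : Prop := out = check_diagonal_matches_py_alt matrix
instance (matrix : List (List String)) (out : List (Int × Int)) : Decidable (Spec_check_diagonal_matches_py matrix out) := by unfold Spec_check_diagonal_matches_py; infer_instance

-- ===== CLAIM (what is proved, stated in full; the proofs are below) =====
def Claim_equal_check_diagonal_matches_py : Prop := ∀ (matrix : List (List String)), Dom_check_diagonal_matches_py matrix → Pre_check_diagonal_matches_py matrix → Spec_check_diagonal_matches_py matrix (check_diagonal_matches_py matrix)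

-- ===== LEMMAS AND PROOFS =====

theorem pvScanLen_stop {matrix : List (List String)} {bound : Int} {jewel : String} {d : Int}
    {v h : Int} (c : Int) (hstop : v < 0 ∨ h > bound - 1 ∨ h < 0) :
    pvScanLen matrix bound jewel d v h c = c := by
  rw [pvScanLen, dif_pos hstop]

theorem pvScanLen_break {matrix : List (List String)} {bound : Int} {jewel : String} {d : Int}
    {v h : Int} (c : Int) (hstop : ¬ (v < 0 ∨ h > bound - 1 ∨ h < 0))
    (hne : pvCell matrix v h ≠ jewel ∨ False) :
    pvScanLen matrix bound jewel d v h c = c := by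
  rw [pvScanLen, dif_neg hstop, if_pos hne]

theorem pvScanLen_step {matrix : List (List String)} {bound : Int} {jewel : String} {d : Int}
    {v h : Int} (c : Int) (hstop : ¬ (v < 0 ∨ h > bound - 1 ∨ h < 0))
    (hne : ¬ (pvCell matrix v h ≠ jewel ∨ False)) :
    pvScanLen matrix bound jewel d v h c =
      pvScanLen matrix bound jewel d (v - 1) (h + d) (c + 1) := by
  rw [pvScanLen, dif_neg hstop, if_neg hne]

theorem pvScanLen_shift_aux (matrix : List (List String)) (bound : Int) (jewel : String) (d : Int) :
    ∀ (n : ℕ) (v h c : Int), (v + 1).toNat ≤ n →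
      pvScanLen matrix bound jewel d v h c = c + pvScanLen matrix bound jewel d v h 0 := by
  intro n
  induction n with
  | zero =>
      intro v h c hn
      rw [pvScanLen_stop c (Or.inl (by omega)), pvScanLen_stop 0 (Or.inl (by omega))]
      omega
  | succ n ih =>
      intro v h c hn
      by_cases hstop : v < 0 ∨ h > bound - 1 ∨ h < 0
      · rw [pvScanLen_stop c hstop, pvScanLen_stop 0 hstop]; omega
      · by_cases hne : pvCell matrix v h ≠ jewel ∨ False
        · rw [pvScanLen_break c hstop hne, pvScanLen_break 0 hstop hne]; omega
        · have hv : ¬ v < 0 := fun hv => hstop (Or.inl hv)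
          rw [pvScanLen_step c hstop hne, pvScanLen_step 0 hstop hne]
          rw [ih (v - 1) (h + d) (c + 1) (by omega), ih (v - 1) (h + d) (0 + 1) (by omega)]
          omega

theorem pvScanLen_shift (matrix : List (List String)) (bound : Int) (jewel : String) (d : Int)
    (v h c : Int) :
    pvScanLen matrix bound jewel d v h c = c + pvScanLen matrix bound jewel d v h 0 :=
  pvScanLen_shift_aux matrix bound jewel d (v + 1).toNat v h c le_rfl
def pvRun (matrix : List (List String)) (C : Nat) (d : Int) : Nat → Int → Int
  | 0, _ => 1
  | i + 1, j =>
      if 0 ≤ j + d ∧ j + d < (C : Int) ∧ pvCell matrix (i + 1 : Nat) j = pvCell matrix (i : Nat) (j + d) then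
        pvRun matrix C d i (j + d) + 1
      else 1

theorem pvScanLen_eq_run (matrix : List (List String)) (C : Nat) (d : Int) :
    ∀ (i : Nat) (j : Int), 0 ≤ j → j < (C : Int) →
    pvScanLen matrix (C : Int) (pvCell matrix (i : Nat) j) d (i : Nat) j 0 = pvRun matrix C d i j := by
  intro i
  induction i with
  | zero =>
      intro j hj0 hjC
      rw [pvScanLen_step 0 (by omega) (by simp)]
      rw [pvScanLen_stop (0+1) (Or.inl (by norm_num))]
      rfl
  | succ i ih =>
      intro j hj0 hjC
      rw [pvScanLen_step 0 (by omega) (by simp)]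
      have hcast : ((i + 1 : Nat) : Int) - 1 = (i : Nat) := by omega
      rw [hcast, pvScanLen_shift, pvRun]
      by_cases hc : 0 ≤ j + d ∧ j + d < (C : Int) ∧ pvCell matrix (i + 1 : Nat) j = pvCell matrix (i : Nat) (j + d)
      · rw [if_pos hc]
        have := ih (j + d) hc.1 hc.2.1
        rw [← hc.2.2] at this
        rw [this]
        omega
      · rw [if_neg hc]
        push Not at hc
        by_cases hb : 0 ≤ j + d ∧ j + d < (C : Int)
        · have hne := hc hb.1 hb.2
          rw [pvScanLen_break 0 (by omega) (Or.inl (fun he => hne he.symm))]; omega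
        · rw [pvScanLen_stop 0 (by omega)]; omega
def pvRowOf (matrix : List (List String)) (C : Nat) (d : Int) (i : Nat) : List Int :=
  (List.range C).map (fun (j : Nat) => pvRun matrix C d i (j : Int))

theorem pvRowR_eq (matrix : List (List String)) (C : Nat) (k : Nat) :
    pvRowR (matrix.getD (k + 1) []) (matrix.getD k []) (pvRowOf matrix C 1 k) C =
      pvRowOf matrix C 1 (k + 1) := by
  unfold pvRowR pvRowOf
  apply List.map_congr_left
  intro j hj
  have hjC : j < C := List.mem_range.mp hj
  rw [pvRun]
  have hcell1 : pvCell matrix ((k + 1 : Nat) : Int) (j : Int) = (matrix.getD (k + 1) []).getD j "" := by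
    simp [pvCell]
  have hcell2 : pvCell matrix ((k : Nat) : Int) ((j : Int) + 1) = (matrix.getD k []).getD (j + 1) "" := by
    simp [pvCell]
  by_cases hc : j + 1 < C ∧ (matrix.getD (k + 1) []).getD j "" = (matrix.getD k []).getD (j + 1) ""
  · rw [if_pos hc, if_pos (by exact ⟨by omega, by omega, by rw [hcell1, hcell2]; exact hc.2⟩)]
    rw [PySem.List.getD_map_range _ _ _ _ hc.1]
    norm_cast
  · rw [if_neg hc, if_neg ?hne]
    case hne =>
      intro hcon
      exact hc ⟨by omega, by rw [hcell1, hcell2] at hcon; exact hcon.2.2⟩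

theorem pvRowL_eq (matrix : List (List String)) (C : Nat) (k : Nat) :
    pvRowL (matrix.getD (k + 1) []) (matrix.getD k []) (pvRowOf matrix C (-1) k) C =
      pvRowOf matrix C (-1) (k + 1) := by
  unfold pvRowL pvRowOf
  apply List.map_congr_left
  intro j hj
  have hjC : j < C := List.mem_range.mp hj
  rw [pvRun]
  have hcell1 : pvCell matrix ((k + 1 : Nat) : Int) (j : Int) = (matrix.getD (k + 1) []).getD j "" := by
    simp [pvCell]
  by_cases hc : 1 ≤ j ∧ (matrix.getD (k + 1) []).getD j "" = (matrix.getD k []).getD (j - 1) ""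
  · have hcell2 : pvCell matrix ((k : Nat) : Int) ((j : Int) + (-1)) = (matrix.getD k []).getD (j - 1) "" := by
      simp [pvCell]
      have hv : ((j : Int) + -1).toNat = j - 1 := by omega
      rw [hv]
    rw [if_pos hc, if_pos (by exact ⟨by omega, by omega, by rw [hcell1, hcell2]; exact hc.2⟩)]
    rw [PySem.List.getD_map_range _ _ _ _ (by omega : j - 1 < C)]
    have hv : ((j : Int) + -1) = ((j - 1 : Nat) : Int) := by omega
    rw [hv]
  · rw [if_neg hc, if_neg ?hne]
    case hne =>
      intro hcon
      have hj1 : 1 ≤ j := by omega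
      have hcell2 : pvCell matrix ((k : Nat) : Int) ((j : Int) + (-1)) = (matrix.getD k []).getD (j - 1) "" := by
        simp [pvCell]
        have hv : ((j : Int) + -1).toNat = j - 1 := by omega
        rw [hv]
      exact hc ⟨hj1, by rw [hcell1, hcell2] at hcon; exact hcon.2.2⟩
theorem pvBuild_aux (matrix : List (List String)) (C : Nat) :
    ∀ (n k : Nat), matrix.length - (k + 1) = n → k < matrix.length →
      pvBuild C (some (matrix.getD k [], pvRowOf matrix C 1 k, pvRowOf matrix C (-1) k))
          (matrix.drop (k + 1)) =
        ((List.range' (k + 1) (matrix.length - (k + 1))).map (pvRowOf matrix C 1),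
         (List.range' (k + 1) (matrix.length - (k + 1))).map (pvRowOf matrix C (-1))) := by
  intro n
  induction n with
  | zero =>
      intro k hn hk
      rw [List.drop_eq_nil_of_le (by omega), hn]
      rfl
  | succ n ih =>
      intro k hn hk
      have hk1 : k + 1 < matrix.length := by omega
      rw [List.drop_eq_getElem_cons hk1, pvBuild]
      have hrow : matrix[k + 1] = matrix.getD (k + 1) [] := (List.getD_eq_getElem _ _ hk1).symm
      rw [hrow, pvRowR_eq, pvRowL_eq, ih (k + 1) (by omega) hk1, hn]
      have hr : List.range' (k + 1) (n + 1) = (k + 1) :: List.range' (k + 2) n := by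
        rw [List.range'_succ]
      rw [hr]
      have hn2 : matrix.length - (k + 1 + 1) = n := by omega
      rw [hn2]
      simp

theorem pvRowOf_zero (matrix : List (List String)) (C : Nat) (d : Int) :
    pvRowOf matrix C d 0 = List.replicate C (1 : Int) := by
  unfold pvRowOf
  have h1 : (List.range C).map (fun (j : Nat) => pvRun matrix C d 0 (j : Int)) =
      (List.range C).map (fun _ => (1 : Int)) := List.map_congr_left (fun a _ => rfl)
  rw [h1, List.map_const', List.length_range]

theorem pvBuild_eq (matrix : List (List String)) (C : Nat) :
    pvBuild C none matrix =
      ((List.range matrix.length).map (pvRowOf matrix C 1),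
       (List.range matrix.length).map (pvRowOf matrix C (-1))) := by
  cases matrix with
  | nil => rfl
  | cons row rest =>
      rw [pvBuild]
      have haux := pvBuild_aux (row :: rest) C rest.length 0 (by simp) (by simp)
      simp only [Nat.zero_add, List.drop_succ_cons, List.drop_zero, List.getD_cons_zero,
        List.length_cons, Nat.add_sub_cancel] at haux
      rw [pvRowOf_zero, pvRowOf_zero] at haux
      rw [haux]
      have hr : List.range (rest.length + 1) = 0 :: List.range' 1 rest.length := by
        rw [List.range_eq_range', List.range'_succ]
      simp [hr, pvRowOf_zero]
def pvAddA (a : List (Int × Int)) (p : Int × Int) : List (Int × Int) :=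
  if p ∈ a then a else a ++ [p]

def pvAddB (sr : PySem.Set (Int × Int) × List (Int × Int)) (p : Int × Int) :
    PySem.Set (Int × Int) × List (Int × Int) :=
  if p ∈ sr.1 then sr else (PySem.Set.add sr.1 p, sr.2 ++ [p])

def pvInv (sr : PySem.Set (Int × Int) × List (Int × Int)) : Prop :=
  ∀ p, p ∈ sr.1 ↔ p ∈ sr.2

theorem pvDedup_fold (pts : List (Int × Int)) :
    ∀ (sr : PySem.Set (Int × Int) × List (Int × Int)), pvInv sr →
      (pts.foldl pvAddB sr).2 = pts.foldl pvAddA sr.2 ∧ pvInv (pts.foldl pvAddB sr) := by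
  induction pts with
  | nil => intro sr h; exact ⟨rfl, h⟩
  | cons p pts ih =>
      intro sr h
      simp only [List.foldl_cons]
      by_cases hp : p ∈ sr.1
      · rw [show pvAddB sr p = sr from by simp [pvAddB, hp],
            show pvAddA sr.2 p = sr.2 from by simp [pvAddA, (h p).mp hp]]
        exact ih sr h
      · rw [show pvAddB sr p = (PySem.Set.add sr.1 p, sr.2 ++ [p]) from by simp [pvAddB, hp],
            show pvAddA sr.2 p = sr.2 ++ [p] from by
              have : p ∉ sr.2 := fun hq => hp ((h p).mpr hq)
              simp [pvAddA, this]]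
        refine ih _ ?_
        intro q
        simp only [PySem.Set.mem_add, List.mem_append, List.mem_singleton, h q]
theorem pvScanDir_right (matrix : List (List String)) (C : Nat)
    (hpre : ∀ row ∈ matrix, row.length = C) (i j : Int)
    (hi : 0 ≤ i ∧ i < matrix.length) (hj : 0 ≤ j ∧ j < C) :
    pvScanDiagonalDirection matrix i j "right" =
      if pvRun matrix C 1 i.toNat j ≥ 3 then
        (List.range (pvRun matrix C 1 i.toNat j).toNat).map
          (fun δ : ℕ => ((i - (δ : Int), j + (δ : Int)) : Int × Int))
      else [] := by
  unfold pvScanDiagonalDirection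
  have hlen : ((matrix.getD i.toNat []).length : Int) = (C : Int) := by
    have := hpre (matrix.getD i.toNat []) (by
      rw [List.getD_eq_getElem _ _ (by omega : i.toNat < matrix.length)]
      exact List.getElem_mem _)
    exact_mod_cast this
  have hic : i = ((i.toNat : Nat) : Int) := by omega
  simp only [reduceIte, hlen]
  rw [hic, pvScanLen_eq_run matrix C 1 i.toNat j hj.1 hj.2]
  simp only [Int.toNat_natCast]
  split_ifs with hge
  · apply List.map_congr_left; intro a _; rw [mul_one]
  · rfl

theorem pvScanDir_left (matrix : List (List String)) (C : Nat)
    (hpre : ∀ row ∈ matrix, row.length = C) (i j : Int)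
    (hi : 0 ≤ i ∧ i < matrix.length) (hj : 0 ≤ j ∧ j < C) :
    pvScanDiagonalDirection matrix i j "left" =
      if pvRun matrix C (-1) i.toNat j ≥ 3 then
        (List.range (pvRun matrix C (-1) i.toNat j).toNat).map
          (fun δ : ℕ => ((i - (δ : Int), j - (δ : Int)) : Int × Int))
      else [] := by
  unfold pvScanDiagonalDirection
  have hlen : ((matrix.getD i.toNat []).length : Int) = (C : Int) := by
    have := hpre (matrix.getD i.toNat []) (by
      rw [List.getD_eq_getElem _ _ (by omega : i.toNat < matrix.length)]
      exact List.getElem_mem _)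
    exact_mod_cast this
  have hic : i = ((i.toNat : Nat) : Int) := by omega
  have hne : (("left" : String) = "right") = False := by simp
  simp only [hne, if_false, hlen]
  rw [hic, pvScanLen_eq_run matrix C (-1) i.toNat j hj.1 hj.2]
  simp only [Int.toNat_natCast]
  split_ifs with hge
  · apply List.map_congr_left; intro a _
    simp [sub_eq_add_neg]
  · rfl
def pvInnerA (matrix : List (List String)) (i : Int) (acc : List (Int × Int)) (j : Int) :
    List (Int × Int) :=
  (pvScanDiagonalDirection matrix i j "left").foldl pvAddA
    ((pvScanDiagonalDirection matrix i j "right").foldl pvAddA acc)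

def pvInnerB (matrix : List (List String)) (C : Nat) (i : Int)
    (sr : PySem.Set (Int × Int) × List (Int × Int)) (j : Int) :
    PySem.Set (Int × Int) × List (Int × Int) :=
  let r := (((List.range matrix.length).map (pvRowOf matrix C 1)).getD i.toNat []).getD j.toNat 0
  let sr1 := if r ≥ 3 then pvEmitR i j r sr else sr
  let l := (((List.range matrix.length).map (pvRowOf matrix C (-1))).getD i.toNat []).getD j.toNat 0
  if l ≥ 3 then pvEmitL i j l sr1 else sr1

theorem pvEmitR_eq (i j r : Int) (sr : PySem.Set (Int × Int) × List (Int × Int)) :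
    pvEmitR i j r sr =
      ((List.range r.toNat).map
        (fun δ : ℕ => ((i - (δ : Int), j + (δ : Int)) : Int × Int))).foldl pvAddB sr := by
  unfold pvEmitR
  rw [List.foldl_map]
  rfl

theorem pvEmitL_eq (i j l : Int) (sr : PySem.Set (Int × Int) × List (Int × Int)) :
    pvEmitL i j l sr =
      ((List.range l.toNat).map
        (fun δ : ℕ => ((i - (δ : Int), j - (δ : Int)) : Int × Int))).foldl pvAddB sr := by
  unfold pvEmitL
  rw [List.foldl_map]
  rfl

theorem pvCellStep (matrix : List (List String)) (C : Nat)
    (hpre : ∀ row ∈ matrix, row.length = C) (i j : Int)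
    (hi : 0 ≤ i ∧ i < matrix.length) (hj : 0 ≤ j ∧ j < C)
    (sr : PySem.Set (Int × Int) × List (Int × Int)) (hinv : pvInv sr) :
    (pvInnerB matrix C i sr j).2 = pvInnerA matrix i sr.2 j ∧
      pvInv (pvInnerB matrix C i sr j) := by
  unfold pvInnerA pvInnerB
  dsimp only
  have hiN : i.toNat < matrix.length := by omega
  have hjN : j.toNat < C := by omega
  have hjc : ((j.toNat : Nat) : Int) = j := by omega
  have hr : (((List.range matrix.length).map (pvRowOf matrix C 1)).getD i.toNat []).getD j.toNat 0
      = pvRun matrix C 1 i.toNat j := by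
    rw [PySem.List.getD_map_range _ _ _ _ hiN]
    unfold pvRowOf
    rw [PySem.List.getD_map_range _ _ _ _ hjN, hjc]
  have hl : (((List.range matrix.length).map (pvRowOf matrix C (-1))).getD i.toNat []).getD j.toNat 0
      = pvRun matrix C (-1) i.toNat j := by
    rw [PySem.List.getD_map_range _ _ _ _ hiN]
    unfold pvRowOf
    rw [PySem.List.getD_map_range _ _ _ _ hjN, hjc]
  rw [hr, hl, pvScanDir_right matrix C hpre i j hi hj, pvScanDir_left matrix C hpre i j hi hj]
  -- express both right-steps as a fold over the same point list
  have hstep1 : (if pvRun matrix C 1 i.toNat j ≥ 3 then pvEmitR i j (pvRun matrix C 1 i.toNat j) sr else sr)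
      = (if pvRun matrix C 1 i.toNat j ≥ 3 then
          (List.range (pvRun matrix C 1 i.toNat j).toNat).map
            (fun δ : ℕ => ((i - (δ : Int), j + (δ : Int)) : Int × Int))
        else []).foldl pvAddB sr := by
    split_ifs with h
    · exact pvEmitR_eq _ _ _ _
    · rfl
  rw [hstep1]
  obtain ⟨h1, hinv1⟩ := pvDedup_fold _ sr hinv
  have hstep2 : ∀ sr1 : PySem.Set (Int × Int) × List (Int × Int),
      (if pvRun matrix C (-1) i.toNat j ≥ 3 then pvEmitL i j (pvRun matrix C (-1) i.toNat j) sr1 else sr1)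
      = (if pvRun matrix C (-1) i.toNat j ≥ 3 then
          (List.range (pvRun matrix C (-1) i.toNat j).toNat).map
            (fun δ : ℕ => ((i - (δ : Int), j - (δ : Int)) : Int × Int))
        else []).foldl pvAddB sr1 := by
    intro sr1
    split_ifs with h
    · exact pvEmitL_eq _ _ _ _
    · rfl
  rw [hstep2]
  obtain ⟨h2, hinv2⟩ := pvDedup_fold _ _ hinv1
  rw [h2, h1]
  exact ⟨rfl, hinv2⟩
theorem pvFoldJ (matrix : List (List String)) (C : Nat)
    (hpre : ∀ row ∈ matrix, row.length = C) (i : Int) (hi : 0 ≤ i ∧ i < matrix.length) :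
    ∀ (Js : List Int), (∀ j ∈ Js, 0 ≤ j ∧ j < C) →
      ∀ (sr : PySem.Set (Int × Int) × List (Int × Int)), pvInv sr →
        (Js.foldl (pvInnerB matrix C i) sr).2 = Js.foldl (pvInnerA matrix i) sr.2 ∧
          pvInv (Js.foldl (pvInnerB matrix C i) sr) := by
  intro Js
  induction Js with
  | nil => intro _ sr h; exact ⟨rfl, h⟩
  | cons j Js ih =>
      intro hJs sr hinv
      simp only [List.foldl_cons]
      obtain ⟨h1, hinv1⟩ := pvCellStep matrix C hpre i j hi (hJs j (by simp)) sr hinv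
      obtain ⟨h2, hinv2⟩ := ih (fun q hq => hJs q (by simp [hq])) _ hinv1
      exact ⟨by rw [h2, h1], hinv2⟩

theorem pvFoldI (matrix : List (List String)) (C : Nat)
    (hpre : ∀ row ∈ matrix, row.length = C) :
    ∀ (Is : List Int), (∀ i ∈ Is, 0 ≤ i ∧ i < matrix.length) →
      ∀ (sr : PySem.Set (Int × Int) × List (Int × Int)), pvInv sr →
        (Is.foldl (fun sr i =>
            (PySem.List.pyRange 0 (C : Int) 1).foldl (pvInnerB matrix C i) sr) sr).2 =
          Is.foldl (fun acc i =>
            (PySem.List.pyRange 0 ((matrix.getD i.toNat []).length : Int) 1).foldl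
              (pvInnerA matrix i) acc) sr.2 ∧
          pvInv (Is.foldl (fun sr i =>
            (PySem.List.pyRange 0 (C : Int) 1).foldl (pvInnerB matrix C i) sr) sr) := by
  intro Is
  induction Is with
  | nil => intro _ sr h; exact ⟨rfl, h⟩
  | cons i Is ih =>
      intro hIs sr hinv
      simp only [List.foldl_cons]
      have hi := hIs i (by simp)
      have hlen : ((matrix.getD i.toNat []).length : Int) = (C : Int) := by
        have := hpre (matrix.getD i.toNat []) (by
          rw [List.getD_eq_getElem _ _ (by omega : i.toNat < matrix.length)]
          exact List.getElem_mem _)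
        exact_mod_cast this
      rw [hlen]
      obtain ⟨h1, hinv1⟩ := pvFoldJ matrix C hpre i hi (PySem.List.pyRange 0 (C : Int) 1)
        (fun j hj => by
          have := (PySem.List.mem_pyRange_one).mp hj
          exact ⟨this.1, this.2⟩) sr hinv
      obtain ⟨h2, hinv2⟩ := ih (fun q hq => hIs q (by simp [hq])) _ hinv1
      exact ⟨by rw [h2, h1], hinv2⟩

theorem pvMain (matrix : List (List String))
    (hpre : ∀ row ∈ matrix, row.length = (matrix.headD []).length) :
    check_diagonal_matches_py matrix = check_diagonal_matches_py_alt matrix := by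
  have h := pvFoldI matrix (matrix.headD []).length hpre
    (PySem.List.pyRange ((matrix.length : Int) - 1) (-1) (-1))
    (fun i hi => by
      have := (PySem.List.mem_pyRange_neg_one).mp hi
      exact ⟨by omega, by omega⟩)
    (PySem.Set.empty, ([] : List (Int × Int)))
    (fun p => by simp [PySem.Set.empty])
  unfold check_diagonal_matches_py_alt
  dsimp only
  rw [pvBuild_eq matrix (matrix.headD []).length]
  exact h.1.symm

-- ===== VERDICT (by name: the statement is the Claim_ definition above) =====
theorem check_diagonal_matches_py_spec : Claim_equal_check_diagonal_matches_py := by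
  intro matrix _ hpre
  unfold Spec_check_diagonal_matches_py
  exact pvMain matrix hpre
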